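-- pv_equiv track=rewrite | github.com/berklee-epd/mtec345-homework | wanlin-huang/lab-5/main.py | bubble_sort_events
-- ===== SOURCE A (Python) =====
-- def bubble_sort_events(arr):
--     """
--     Run bubble sort and record each comparison/swap as an event.
--     Returns list of (type, index_a, index_b, array_snapshot)
--     type = 'compare' or 'swap'
--     """
--     a      = arr[:]
--     events = []
--     n      = len(a)
--     for i in range(n - 1):
--         for j in range(n - 1 - i):
--             events.append(('compare', j, j+1, a[:]))
--             if a[j] > a[j+1]:
--                 a[j], a[j+1] = a[j+1], a[j]
--                 events.append(('swap', j, j+1, a[:]))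
--     return events
-- ===== SOURCE B (Python) =====
-- def bubble_sort_events(arr):
--     """
--     Run bubble sort and record each comparison/swap as an event.
--     Returns list of (type, index_a, index_b, array_snapshot)
--     type = 'compare' or 'swap'
--     """
--     events = []
--
--     def step(a, j, m):
--         # one inner pass, recursively over j = 0 .. m-2
--         if j >= m - 1:
--             return
--         events.append(('compare', j, j + 1, a[:]))
--         if a[j] > a[j + 1]:
--             a[j], a[j + 1] = a[j + 1], a[j]
--             events.append(('swap', j, j + 1, a[:]))
--         step(a, j + 1, m)
--
--     def rec(a, m):
--         # recursive bubble sort: one pass over the first m elements, then recurse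
--         if m <= 1:
--             return
--         step(a, 0, m)
--         rec(a, m - 1)
--
--     rec(arr[:], len(arr))
--     return events
-- ===== Notes on version B (the rewrite author's own statement) =====
-- stated objective: alternative
-- what changed: Replaced the two nested for-loops with a fully recursive decomposition: a recursive inner pass step(a, j, m) and a tail-recursive outer rec(a, m) that shrinks the sorted-suffix bound, instead of index arithmetic over range(n-1) and range(n-1-i).
import Mathlib
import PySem

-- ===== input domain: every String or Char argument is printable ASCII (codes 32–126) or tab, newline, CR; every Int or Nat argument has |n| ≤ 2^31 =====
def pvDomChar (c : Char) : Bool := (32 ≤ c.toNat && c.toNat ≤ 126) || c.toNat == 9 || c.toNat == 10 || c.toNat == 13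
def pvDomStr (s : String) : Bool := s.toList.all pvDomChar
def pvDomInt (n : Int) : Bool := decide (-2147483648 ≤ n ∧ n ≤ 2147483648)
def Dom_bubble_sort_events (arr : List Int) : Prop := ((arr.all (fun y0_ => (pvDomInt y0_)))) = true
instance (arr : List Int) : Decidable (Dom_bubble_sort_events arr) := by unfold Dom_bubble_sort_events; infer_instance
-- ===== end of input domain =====

-- B replaces A's two nested index for-loops by a recursive decomposition (recursive inner
-- pass + tail-recursive outer bound); same events, same cost ("alternative", not faster).

-- ===== PORT A =====
-- literal transliteration of A: nested for-loops over range(n-1) and range(n-1-i),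
-- state = (working array a, events list); a[j]/a[j+1] via pyGetD/pySetD (indices always in range)
def bubble_sort_events (arr : List Int) : List (String × Int × Int × List Int) :=
  let a := arr
  let n : Int := a.length
  let st :=
    (PySem.List.pyRange 0 (n - 1) 1).foldl (fun (st : List Int × List (String × Int × Int × List Int)) i =>
      (PySem.List.pyRange 0 (n - 1 - i) 1).foldl (fun (st : List Int × List (String × Int × Int × List Int)) j =>
        let a := st.1
        let ev := st.2 ++ [("compare", j, j + 1, a)]
        if PySem.List.pyGetD a j 0 > PySem.List.pyGetD a (j + 1) 0 then
          let x := PySem.List.pyGetD a j 0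
          let y := PySem.List.pyGetD a (j + 1) 0
          let a' := PySem.List.pySetD (PySem.List.pySetD a j y) (j + 1) x
          (a', ev ++ [("swap", j, j + 1, a')])
        else
          (a, ev)) st) (a, [])
  st.2

-- ===== PORT B =====
-- B-side helpers: `bseStep` is Source B's recursive inner pass step(a, j, m) (recursion on the
-- remaining count rem = m-1-j, carrying j); `bseRec` is Source B's rec(a, m).
def bseStep (a : List Int) (ev : List (String × Int × Int × List Int)) (j : Nat) (rem : Nat) :
    List Int × List (String × Int × Int × List Int) :=
  match rem with
  | 0 => (a, ev)
  | r + 1 =>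
    let ev := ev ++ [("compare", (j : Int), (j : Int) + 1, a)]
    if a.getD j 0 > a.getD (j + 1) 0 then
      let a' := (a.set j (a.getD (j + 1) 0)).set (j + 1) (a.getD j 0)
      bseStep a' (ev ++ [("swap", (j : Int), (j : Int) + 1, a')]) (j + 1) r
    else
      bseStep a ev (j + 1) r

def bseRec (a : List Int) (m : Nat) (ev : List (String × Int × Int × List Int)) :
    List (String × Int × Int × List Int) :=
  match m with
  | 0 => ev
  | 1 => ev
  | k + 2 =>
    let st := bseStep a ev 0 (k + 1)
    bseRec st.1 (k + 1) st.2

def bubble_sort_events_alt (arr : List Int) : List (String × Int × Int × List Int) :=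
  bseRec arr arr.length []

-- ===== PRECONDITION & SPEC =====
def Spec_bubble_sort_events (arr : List Int) (out : List (String × Int × Int × List Int)) : Prop := out = bubble_sort_events_alt arr
instance (arr : List Int) (out : List (String × Int × Int × List Int)) : Decidable (Spec_bubble_sort_events arr out) := by unfold Spec_bubble_sort_events; infer_instance

-- ===== CLAIM (what is proved, stated in full; the proofs are below) =====
def Claim_equal_bubble_sort_events : Prop := ∀ (arr : List Int), Dom_bubble_sort_events arr → Spec_bubble_sort_events arr (bubble_sort_events arr)

-- ===== LEMMAS AND PROOFS =====

-- abbreviation for A's inner-loop body (proof-side only)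
def innerA (st : List Int × List (String × Int × Int × List Int)) (j : Int) :
    List Int × List (String × Int × Int × List Int) :=
  let a := st.1
  let ev := st.2 ++ [("compare", j, j + 1, a)]
  if PySem.List.pyGetD a j 0 > PySem.List.pyGetD a (j + 1) 0 then
    let x := PySem.List.pyGetD a j 0
    let y := PySem.List.pyGetD a (j + 1) 0
    let a' := PySem.List.pySetD (PySem.List.pySetD a j y) (j + 1) x
    (a', ev ++ [("swap", j, j + 1, a')])
  else
    (a, ev)

-- A's inner loop over indices j, j+1, …, j+rem-1 is Source B's recursive pass bseStep
theorem inner_eq (rem : Nat) : ∀ (j : Nat) (a : List Int)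
    (ev : List (String × Int × Int × List Int)),
    (PySem.List.pyRange (j : Int) ((j : Int) + rem) 1).foldl innerA (a, ev) = bseStep a ev j rem := by
  induction rem with
  | zero => intro j a ev; simp [PySem.List.pyRange_one_eq_nil, bseStep]
  | succ r ih =>
    intro j a ev
    rw [PySem.List.pyRange_one_cons (by omega)]
    rw [List.foldl_cons]
    have hc : ((j : Int) + 1) + (r : Int) = (j : Int) + ((r : Nat) + 1 : Nat) := by push_cast; ring
    have := ih (j + 1)
    simp only [innerA, bseStep]
    by_cases hgt : PySem.List.pyGetD a (j : Int) 0 > PySem.List.pyGetD a ((j : Int) + 1) 0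
    · have h1 : PySem.List.pyGetD a (j : Int) 0 = a.getD j 0 := PySem.List.pyGetD_natCast a j 0
      have h2 : PySem.List.pyGetD a ((j : Int) + 1) 0 = a.getD (j + 1) 0 := by
        have : ((j : Int) + 1) = ((j + 1 : Nat) : Int) := by push_cast; ring
        rw [this, PySem.List.pyGetD_natCast]
      rw [if_pos hgt, if_pos (by rw [← h1, ← h2]; exact hgt)]
      have hset : PySem.List.pySetD (PySem.List.pySetD a (j : Int) (PySem.List.pyGetD a ((j : Int) + 1) 0)) ((j : Int) + 1) (PySem.List.pyGetD a (j : Int) 0)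
          = (a.set j (a.getD (j + 1) 0)).set (j + 1) (a.getD j 0) := by
        have hj1 : ((j : Int) + 1) = ((j + 1 : Nat) : Int) := by push_cast; ring
        rw [h1, h2, hj1, PySem.List.pySetD_natCast, PySem.List.pySetD_natCast]
      simp only [hset]
      rw [show (j : Int) + ((r : Nat) + 1 : Nat) = ((j : Int) + 1) + r by push_cast; ring,
        show ((j : Int) + 1) = ((j + 1 : Nat) : Int) by push_cast; ring]
      exact ih (j + 1) _ _
    · have h1 : PySem.List.pyGetD a (j : Int) 0 = a.getD j 0 := PySem.List.pyGetD_natCast a j 0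
      have h2 : PySem.List.pyGetD a ((j : Int) + 1) 0 = a.getD (j + 1) 0 := by
        have : ((j : Int) + 1) = ((j + 1 : Nat) : Int) := by push_cast; ring
        rw [this, PySem.List.pyGetD_natCast]
      rw [if_neg hgt, if_neg (by rw [← h1, ← h2]; exact hgt)]
      rw [show (j : Int) + ((r : Nat) + 1 : Nat) = ((j : Int) + 1) + r by push_cast; ring,
        show ((j : Int) + 1) = ((j + 1 : Nat) : Int) by push_cast; ring]
      exact ih (j + 1) _ _

-- A's outer loop, started with m passes remaining, is Source B's rec
theorem outer_eq (n : Nat) : ∀ (m : Nat), m ≤ n → ∀ (a : List Int)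
    (ev : List (String × Int × Int × List Int)),
    ((PySem.List.pyRange ((n : Int) - m) ((n : Int) - 1) 1).foldl
      (fun st i => (PySem.List.pyRange 0 ((n : Int) - 1 - i) 1).foldl innerA st) (a, ev)).2
      = bseRec a m ev := by
  intro m
  induction m with
  | zero => intro _ a ev; rw [PySem.List.pyRange_one_eq_nil (by omega)]; simp [bseRec]
  | succ k ih =>
    intro hk a ev
    match k with
    | 0 =>
      rw [PySem.List.pyRange_one_eq_nil (by omega)]; simp [bseRec]
    | k' + 1 =>
      rw [PySem.List.pyRange_one_cons (by omega)]
      rw [List.foldl_cons]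
      have hlen : (n : Int) - 1 - ((n : Int) - (k' + 2 : Nat)) = ((k' + 1 : Nat) : Int) := by
        push_cast; omega
      have hin := inner_eq (k' + 1) 0 a ev
      simp only [Nat.cast_zero, zero_add] at hin
      rw [hlen, hin]
      have hstep : ((n : Int) - (k' + 2 : Nat)) + 1 = (n : Int) - ((k' + 1 : Nat) : Int) := by
        push_cast; ring
      rw [hstep]
      show ((PySem.List.pyRange ((n : Int) - ((k' + 1 : Nat) : Int)) ((n : Int) - 1) 1).foldl
        (fun st i => (PySem.List.pyRange 0 ((n : Int) - 1 - i) 1).foldl innerA st)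
        (bseStep a ev 0 (k' + 1))).2 = bseRec a (k' + 2) ev
      rw [show bseStep a ev 0 (k' + 1)
          = ((bseStep a ev 0 (k' + 1)).1, (bseStep a ev 0 (k' + 1)).2) from rfl]
      rw [ih (by omega) _ _]
      rfl

-- ===== VERDICT (by name: the statement is the Claim_ definition above) =====
theorem bubble_sort_events_spec : Claim_equal_bubble_sort_events := by
  intro arr _
  show bubble_sort_events arr = bubble_sort_events_alt arr
  unfold bubble_sort_events bubble_sort_events_alt
  have h := outer_eq arr.length arr.length (le_refl _) arr []
  rw [show ((arr.length : Int) - (arr.length : Nat)) = (0 : Int) by ring] at h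
  exact h
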